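-- pv_equiv track=rewrite | github.com/Moony-H/Algorithm | Python/기타 알고리즘/알고리즘-호텔 방 배정(union find).py | emptyRoom
-- ===== SOURCE A (Python) =====
-- def emptyRoom(m, room_list):
--     if  m not in room_list:
--         room_list[m]=m+1
--         return m
--     else:
--         temp=emptyRoom(room_list[m],room_list)
--         room_list[m]=temp+1
--         return temp
-- ===== SOURCE B (Python) =====
-- def emptyRoom(m, room_list):
--     # iterative path walk instead of recursion; same mutations, same return value
--     path = []
--     cur = m
--     while cur in room_list:
--         path.append(cur)
--         cur = room_list[cur]
--     nxt = cur + 1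
--     room_list[cur] = nxt
--     for k in path:
--         room_list[k] = nxt
--     return cur
-- ===== Notes on version B (the rewrite author's own statement) =====
-- stated objective: idiomatic
-- what changed: Replaces the recursive find-with-path-compression by an iterative loop that records the traversed keys in a list and then writes empty+1 to the found room and all recorded keys in one pass, avoiding recursion and Python's recursion limit.
import Mathlib
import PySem

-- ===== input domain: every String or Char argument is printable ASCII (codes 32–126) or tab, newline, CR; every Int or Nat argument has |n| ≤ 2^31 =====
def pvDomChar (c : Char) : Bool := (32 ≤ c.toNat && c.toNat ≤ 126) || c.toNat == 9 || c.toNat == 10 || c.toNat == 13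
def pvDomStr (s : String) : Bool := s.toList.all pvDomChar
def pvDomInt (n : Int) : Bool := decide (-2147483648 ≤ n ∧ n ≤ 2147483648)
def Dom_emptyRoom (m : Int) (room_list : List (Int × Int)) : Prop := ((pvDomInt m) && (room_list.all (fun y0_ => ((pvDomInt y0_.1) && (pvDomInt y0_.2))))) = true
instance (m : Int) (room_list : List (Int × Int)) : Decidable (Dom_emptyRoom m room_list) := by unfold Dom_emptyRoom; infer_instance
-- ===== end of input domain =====

-- B replaces A's recursion by an iterative walk + one write pass (same return value and
-- same dict mutations); the equivalence proved here is about the RETURN value only.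

-- ===== PORT A =====
-- A's recursion, threading the mutated dict; fuel = |room_list| + 1 suffices on Pre_
-- (on Pre_ the chain from m terminates, hence visits pairwise distinct keys).
def emptyRoomRec (fuel : Nat) (m : Int) (d : PySem.Dict Int Int) : Int × PySem.Dict Int Int :=
  match fuel with
  | 0 => (m, d)   -- unreachable on Pre_ (Python raises RecursionError on cyclic chains)
  | Nat.succ f =>
    match PySem.Dict.get? d m with
    | none => (m, PySem.Dict.insert d m (m + 1))
    | some v =>
      let r := emptyRoomRec f v d
      (r.1, PySem.Dict.insert r.2 m (r.1 + 1))

def emptyRoom (m : Int) (room_list : List (Int × Int)) : Int :=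
  (emptyRoomRec (room_list.length + 1) m (PySem.Dict.mk room_list)).1

-- ===== PORT B =====
-- iterative walk collecting the traversed keys
def walkRooms (fuel : Nat) (cur : Int) (path : List Int) (d : PySem.Dict Int Int) : Int × List Int :=
  match fuel with
  | 0 => (cur, path)
  | Nat.succ f =>
    match PySem.Dict.get? d cur with
    | none => (cur, path)
    | some v => walkRooms f v (path ++ [cur]) d

def emptyRoom_alt (m : Int) (room_list : List (Int × Int)) : Int :=
  let r := walkRooms (room_list.length + 1) m [] (PySem.Dict.mk room_list)
  let nxt := r.1 + 1
  let d1 := PySem.Dict.insert (PySem.Dict.mk room_list) r.1 nxt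
  let _ := r.2.foldl (fun d k => PySem.Dict.insert d k nxt) d1   -- the write pass (mutation; not part of the return value)
  r.1

-- ===== PRECONDITION & SPEC =====
-- Pre_ excludes exactly the inputs on which Python A raises RecursionError: when the
-- lookup chain starting at m never leaves the key set (i.e. some key subset containing m
-- has no exit, a graph condition); on every other input A returns and B matches.
def Pre_emptyRoom (m : Int) (room_list : List (Int × Int)) : Prop :=
  ∀ S ∈ ((room_list.map Prod.fst).toFinset).powerset, m ∈ S →
    ∃ k ∈ S, ∀ v ∈ S, PySem.Dict.get? (PySem.Dict.mk room_list) k ≠ some v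
instance (m : Int) (room_list : List (Int × Int)) : Decidable (Pre_emptyRoom m room_list) := by
  unfold Pre_emptyRoom; infer_instance
def pvWitness_emptyRoom : Int × (List (Int × Int)) := (0, [(0, 1), (1, 3), (5, 2)])

def Spec_emptyRoom (m : Int) (room_list : List (Int × Int)) (out : Int) : Prop := out = emptyRoom_alt m room_list
instance (m : Int) (room_list : List (Int × Int)) (out : Int) : Decidable (Spec_emptyRoom m room_list out) := by unfold Spec_emptyRoom; infer_instance

-- ===== CLAIM (what is proved, stated in full; the proofs are below) =====
def Claim_equal_emptyRoom : Prop := ∀ (m : Int) (room_list : List (Int × Int)), Dom_emptyRoom m room_list → Pre_emptyRoom m room_list → Spec_emptyRoom m room_list (emptyRoom m room_list)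

-- ===== LEMMAS AND PROOFS =====

-- Both ports follow the same lookup chain; the returned value is its endpoint,
-- independent of the threaded dict (A) resp. the accumulated path (B).
theorem emptyRoomRec_fst_eq_walkRooms_fst (fuel : Nat) :
    ∀ (m : Int) (path : List Int) (d : PySem.Dict Int Int),
      (emptyRoomRec fuel m d).1 = (walkRooms fuel m path d).1 := by
  induction fuel with
  | zero => intro m path d; rfl
  | succ f ih =>
    intro m path d
    simp only [emptyRoomRec, walkRooms]
    cases PySem.Dict.get? d m with
    | none => rfl
    | some v => exact ih v (path ++ [m]) d

-- ===== VERDICT (by name: the statement is the Claim_ definition above) =====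
theorem emptyRoom_spec : Claim_equal_emptyRoom := by
  intro m room_list _ _
  unfold Spec_emptyRoom emptyRoom emptyRoom_alt
  exact emptyRoomRec_fst_eq_walkRooms_fst _ m [] _
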